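-- pv_equiv track=rewrite | github.com/MrBrantCode/unitest_baseline | mut_generate/mist_train_taco/taco_2177/solution.py | calculate_prime_factorials
-- ===== SOURCE A (Python) =====
-- import math
--
-- def calculate_prime_factorials(n):
--     def is_prime(num):
--         if num < 2:
--             return False
--         for i in range(2, int(math.sqrt(num)) + 1):
--             if num % i == 0:
--                 return False
--         return True
--
--     def factorial(num):
--         prod = 1
--         while num != 1:
--             prod *= num
--             num -= 1
--         return prod
--
--     prime_factorials = []
--     for num in range(2, n + 1):
--         if is_prime(num):
--             prime_factorials.append(factorial(num))
--
--     return prime_factorials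
-- ===== SOURCE B (Python) =====
-- def calculate_prime_factorials(n):
--     primes = []
--     factorials = []
--     fact = 1
--     for num in range(2, n + 1):
--         fact *= num
--         is_p = True
--         for p in primes:
--             if p * p > num:
--                 break
--             if num % p == 0:
--                 is_p = False
--                 break
--         if is_p:
--             primes.append(num)
--             factorials.append(fact)
--     return factorials
-- ===== Notes on version B (the rewrite author's own statement) =====
-- stated objective: faster
-- what changed: B keeps a running cumulative factorial instead of recomputing each factorial from scratch, and tests primality by dividing only by the primes found so far up to sqrt(num) instead of by every integer up to sqrt(num).
import Mathlib
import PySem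

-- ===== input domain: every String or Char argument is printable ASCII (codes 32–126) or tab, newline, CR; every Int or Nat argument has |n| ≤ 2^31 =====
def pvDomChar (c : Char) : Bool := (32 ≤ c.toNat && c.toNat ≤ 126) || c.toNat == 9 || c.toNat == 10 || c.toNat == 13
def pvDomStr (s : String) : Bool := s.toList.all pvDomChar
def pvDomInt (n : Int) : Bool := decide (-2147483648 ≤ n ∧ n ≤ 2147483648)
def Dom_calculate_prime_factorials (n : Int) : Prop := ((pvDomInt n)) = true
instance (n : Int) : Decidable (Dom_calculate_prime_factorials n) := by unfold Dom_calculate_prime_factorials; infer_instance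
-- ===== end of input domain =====

-- B replaces A's per-number factorial recomputation and full trial division by a single pass
-- with a running cumulative factorial and trial division only by the primes found so far (faster).

-- ===== PORT A =====
-- int(math.sqrt(num)) is ported as Nat.sqrt: exact for 0 ≤ num ≤ 2^31 (a double sqrt cannot
-- cross an integer there except at exact squares, where it is exact).
def pvIsPrimeA (num : Int) : Bool :=
  if num < 2 then false
  else if (PySem.List.pyRange 2 ((Nat.sqrt num.toNat : Int) + 1) 1).any
            (fun i => PySem.Int.mod num i == 0) then false
  else true

-- the while-loop of A's factorial; fuel num.toNat is enough since A only calls it with num ≥ 2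
def pvFactLoopA (prod : Int) (num : Int) : Nat → Int
  | 0 => prod
  | fuel + 1 => if num == 1 then prod else pvFactLoopA (prod * num) (num - 1) fuel

def pvFactA (num : Int) : Int := pvFactLoopA 1 num num.toNat

def calculate_prime_factorials (n : Int) : List Int :=
  (PySem.List.pyRange 2 (n + 1) 1).foldl
    (fun acc num => if pvIsPrimeA num then acc ++ [pvFactA num] else acc) []

-- ===== PORT B =====
-- the inner 'for p in primes' loop with its two breaks
def pvScanB (num : Int) : List Int → Bool
  | [] => true
  | p :: ps =>
    if p * p > num then true
    else if PySem.Int.mod num p == 0 then false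
    else pvScanB num ps

-- one iteration of B's main loop; state = (primes, factorials, fact)
def pvStepB (st : List Int × List Int × Int) (num : Int) : List Int × List Int × Int :=
  let fact := st.2.2 * num
  if pvScanB num st.1 then (st.1 ++ [num], st.2.1 ++ [fact], fact)
  else (st.1, st.2.1, fact)

def calculate_prime_factorials_alt (n : Int) : List Int :=
  ((PySem.List.pyRange 2 (n + 1) 1).foldl pvStepB ([], [], 1)).2.1

-- ===== PRECONDITION & SPEC =====
def Spec_calculate_prime_factorials (n : Int) (out : List Int) : Prop := out = calculate_prime_factorials_alt n
instance (n : Int) (out : List Int) : Decidable (Spec_calculate_prime_factorials n out) := by unfold Spec_calculate_prime_factorials; infer_instance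

-- ===== CLAIM (what is proved, stated in full; the proofs are below) =====
def Claim_equal_calculate_prime_factorials : Prop := ∀ (n : Int), Dom_calculate_prime_factorials n → Spec_calculate_prime_factorials n (calculate_prime_factorials n)

-- ===== LEMMAS AND PROOFS =====

-- the ascending list of primes among 2, …, N+1, as Ints
def pvPlist (N : Nat) : List Int :=
  ((List.range N).map (fun k => ((k + 2 : Nat) : Int))).filter (fun x => decide (Nat.Prime x.toNat))

def pvFlist (N : Nat) : List Int :=
  (pvPlist N).map (fun p => (Nat.factorial p.toNat : Int))

theorem pvFactLoopA_eq (m : Nat) (hm : 1 ≤ m) :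
    ∀ prod : Int, pvFactLoopA prod (m : Int) m = prod * (Nat.factorial m : Int) := by
  induction m with
  | zero => omega
  | succ m ih =>
    intro prod
    by_cases h0 : m = 0
    · subst h0; simp [pvFactLoopA, Nat.factorial]
    · have hne : (((m + 1 : Nat) : Int) == 1) = false := by
        rw [beq_eq_false_iff_ne]; push_cast; omega
      simp only [pvFactLoopA, hne]
      have h1 : ((m + 1 : Nat) : Int) - 1 = (m : Int) := by push_cast; ring
      rw [if_neg (by simp), h1, ih (by omega), Nat.factorial_succ]
      push_cast; ring

theorem pvFactA_eq (N : Nat) : pvFactA ((N + 2 : Nat) : Int) = (Nat.factorial (N + 2) : Int) := by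
  have h2 : (((N + 2 : Nat) : Int)).toNat = N + 2 := by omega
  rw [pvFactA, h2, pvFactLoopA_eq (N + 2) (by omega) 1, one_mul]

theorem pvIsPrimeA_iff (N : Nat) : pvIsPrimeA ((N + 2 : Nat) : Int) = true ↔ Nat.Prime (N + 2) := by
  have hlt : ¬ (((N + 2 : Nat) : Int) < 2) := by omega
  have htn : (((N + 2 : Nat) : Int)).toNat = N + 2 := by omega
  simp only [pvIsPrimeA, hlt, if_false, htn]
  rw [show ∀ a : Bool, (if a = true then false else true) = !a from fun a => by cases a <;> simp]
  constructor
  · intro h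
    rw [Bool.not_eq_true', List.any_eq_false] at h
    rw [Nat.prime_def_le_sqrt]
    refine ⟨by omega, fun d hd2 hds hdvd => ?_⟩
    have hmem : (d : Int) ∈ PySem.List.pyRange 2 ((Nat.sqrt (N + 2) : Int) + 1) 1 := by
      rw [PySem.List.mem_pyRange_one]
      constructor
      · exact_mod_cast hd2
      · have : (d : Int) ≤ (Nat.sqrt (N + 2) : Int) := by exact_mod_cast hds
        omega
    have := h _ hmem
    apply this
    rw [beq_iff_eq, PySem.Int.mod_eq_zero_iff_dvd]
    exact_mod_cast hdvd
  · intro hp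
    rw [Bool.not_eq_true', List.any_eq_false]
    intro i hi
    rw [PySem.List.mem_pyRange_one] at hi
    simp only [beq_iff_eq]
    intro hmod
    rw [PySem.Int.mod_eq_zero_iff_dvd] at hmod
    have hidvd : i.toNat ∣ N + 2 := by
      have : (i.toNat : Int) ∣ ((N + 2 : Nat) : Int) := by
        rw [Int.toNat_of_nonneg (by omega)]; exact_mod_cast hmod
      exact_mod_cast this
    exact (Nat.prime_def_le_sqrt.mp hp).2 i.toNat (by omega) (by omega) hidvd

theorem pvPlist_mem (N : Nat) (p : Int) :
    p ∈ pvPlist N ↔ 2 ≤ p ∧ p < 2 + N ∧ Nat.Prime p.toNat := by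
  simp only [pvPlist, List.mem_filter, List.mem_map, List.mem_range, decide_eq_true_eq]
  constructor
  · rintro ⟨⟨k, hk, rfl⟩, hp⟩
    refine ⟨by exact_mod_cast Nat.le_add_left 2 k, ?_, hp⟩
    have : ((k + 2 : Nat) : Int) < ((N + 2 : Nat) : Int) := by exact_mod_cast by omega
    push_cast at this ⊢; omega
  · rintro ⟨h2, hN, hp⟩
    refine ⟨⟨(p - 2).toNat, by omega, by omega⟩, hp⟩

theorem pvPlist_sorted (N : Nat) : (pvPlist N).Pairwise (· ≤ ·) := by
  apply List.Pairwise.filter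
  rw [List.pairwise_map]
  exact (List.pairwise_lt_range).imp (fun {a b} h => by exact_mod_cast by omega)

theorem pvScanB_iff (x : Int) (_hx : 2 ≤ x) :
    ∀ ps : List Int, (∀ p ∈ ps, 2 ≤ p) → ps.Pairwise (· ≤ ·) →
      (pvScanB x ps = true ↔ ∀ p ∈ ps, p * p ≤ x → ¬ (p ∣ x)) := by
  intro ps
  induction ps with
  | nil => intro _ _; simp [pvScanB]
  | cons p ps ih =>
    intro h2 hsort
    have hp2 : 2 ≤ p := h2 p (List.mem_cons_self ..)
    rw [List.pairwise_cons] at hsort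
    by_cases hgt : p * p > x
    · rw [show pvScanB x (p :: ps) = true from by simp [pvScanB, hgt]]
      simp only [true_iff, List.mem_cons]
      rintro q (rfl | hq) hqx
      · omega
      · have hpq : p ≤ q := hsort.1 q hq
        have : p * p ≤ q * q := mul_le_mul hpq hpq (by omega) (by omega)
        omega
    · by_cases hdvd : (PySem.Int.mod x p == 0) = true
      · rw [show pvScanB x (p :: ps) = false from by simp [pvScanB, hgt, hdvd]]
        rw [beq_iff_eq, PySem.Int.mod_eq_zero_iff_dvd] at hdvd
        simp only [Bool.false_eq_true, false_iff]
        push Not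
        exact ⟨p, List.mem_cons_self .., by omega, hdvd⟩
      · rw [show pvScanB x (p :: ps) = pvScanB x ps from by
          simp only [pvScanB, if_neg hgt]
          rw [if_neg (by simpa using hdvd)]]
        rw [ih (fun q hq => h2 q (List.mem_cons_of_mem _ hq)) hsort.2]
        have hnd : ¬ (p ∣ x) := by
          intro hd
          exact hdvd (by rw [beq_iff_eq, PySem.Int.mod_eq_zero_iff_dvd]; exact hd)
        constructor
        · intro h q hq
          rcases List.mem_cons.mp hq with rfl | hq'
          · exact fun _ => hnd
          · exact h q hq'
        · intro h q hq
          exact h q (List.mem_cons_of_mem _ hq)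

theorem pvScanB_plist (N : Nat) :
    pvScanB ((N + 2 : Nat) : Int) (pvPlist N) = true ↔ Nat.Prime (N + 2) := by
  rw [pvScanB_iff ((N + 2 : Nat) : Int) (by exact_mod_cast Nat.le_add_left 2 N) (pvPlist N)
      (fun p hp => ((pvPlist_mem N p).mp hp).1) (pvPlist_sorted N)]
  constructor
  · intro h
    by_contra hnp
    set m := N + 2 with hm
    have hq := Nat.minFac_prime (n := m) (by omega)
    have hqd : m.minFac ∣ m := Nat.minFac_dvd m
    have hq2 : 2 ≤ m.minFac := hq.two_le
    have hqsq : m.minFac * m.minFac ≤ m := by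
      have := Nat.minFac_sq_le_self (n := m) (by omega) hnp
      nlinarith
    have hqlt : m.minFac < m := by nlinarith
    have hmem : ((m.minFac : Nat) : Int) ∈ pvPlist N := by
      rw [pvPlist_mem]
      refine ⟨by exact_mod_cast hq2, by omega, by simpa using hq⟩
    apply h _ hmem (by exact_mod_cast hqsq)
    exact_mod_cast hqd
  · intro hp q hq _ hqdvd
    obtain ⟨h2, hlt, hqp⟩ := (pvPlist_mem N q).mp hq
    have hdnat : q.toNat ∣ N + 2 := by
      have : (q.toNat : Int) ∣ ((N + 2 : Nat) : Int) := by
        rw [Int.toNat_of_nonneg (by omega)]; exact hqdvd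
      exact_mod_cast this
    rcases Nat.Prime.eq_one_or_self_of_dvd hp q.toNat hdnat with h1 | hself
    · omega
    · omega

theorem pvPlist_succ (N : Nat) :
    pvPlist (N + 1) =
      pvPlist N ++ (if Nat.Prime (N + 2) then [((N + 2 : Nat) : Int)] else []) := by
  unfold pvPlist
  rw [List.range_succ, List.map_append, List.filter_append]
  congr 1
  simp only [List.map_cons, List.map_nil, List.filter]
  have h : (((N + 2 : Nat) : Int)).toNat = N + 2 := by omega
  rw [h]
  split_ifs with hp <;> simp [hp]

theorem pvFlist_succ (N : Nat) :
    pvFlist (N + 1) =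
      pvFlist N ++ (if Nat.Prime (N + 2) then [(Nat.factorial (N + 2) : Int)] else []) := by
  unfold pvFlist
  rw [pvPlist_succ, List.map_append]
  congr 1
  split_ifs
  · simp only [List.map_cons, List.map_nil, show (((N + 2 : Nat) : Int)).toNat = N + 2 from by omega]
  · rfl

theorem foldA_eq (N : Nat) :
    ((List.range N).map (fun k => ((k + 2 : Nat) : Int))).foldl
      (fun acc num => if pvIsPrimeA num then acc ++ [pvFactA num] else acc) [] = pvFlist N := by
  induction N with
  | zero => simp [pvFlist, pvPlist]
  | succ N ih =>
    rw [List.range_succ, List.map_append, List.foldl_append, ih, pvFlist_succ]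
    simp only [List.map_cons, List.map_nil, List.foldl_cons, List.foldl_nil]
    by_cases hp : Nat.Prime (N + 2)
    · rw [if_pos ((pvIsPrimeA_iff N).mpr hp), if_pos hp, pvFactA_eq]
    · rw [if_neg (fun h => hp ((pvIsPrimeA_iff N).mp h)), if_neg hp, List.append_nil]

theorem foldB_eq (N : Nat) :
    ((List.range N).map (fun k => ((k + 2 : Nat) : Int))).foldl pvStepB ([], [], 1) =
      (pvPlist N, pvFlist N, (Nat.factorial (N + 1) : Int)) := by
  induction N with
  | zero => simp [pvFlist, pvPlist, Nat.factorial]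
  | succ N ih =>
    rw [List.range_succ, List.map_append, List.foldl_append, ih]
    simp only [List.map_cons, List.map_nil, List.foldl_cons, List.foldl_nil]
    have hfact : (Nat.factorial (N + 1) : Int) * ((N + 2 : Nat) : Int) = (Nat.factorial (N + 2) : Int) := by
      rw [show N + 2 = (N + 1) + 1 from rfl, Nat.factorial_succ (N + 1)]
      push_cast; ring
    by_cases hp : Nat.Prime (N + 2)
    · rw [pvStepB, if_pos ((pvScanB_plist N).mpr hp)]
      rw [pvPlist_succ, pvFlist_succ, if_pos hp, if_pos hp]
      simp only [hfact]
    · rw [pvStepB, if_neg (fun h => hp ((pvScanB_plist N).mp h))]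
      rw [pvPlist_succ, pvFlist_succ, if_neg hp, if_neg hp]
      simp only [hfact, List.append_nil]

theorem both_eq (n : Int) : calculate_prime_factorials n = calculate_prime_factorials_alt n := by
  unfold calculate_prime_factorials calculate_prime_factorials_alt
  rw [PySem.List.pyRange_one]
  have hmap : (List.range (n + 1 - 2).toNat).map (fun k : Nat => (2 : Int) + (k : Int)) =
      (List.range (n + 1 - 2).toNat).map (fun k : Nat => ((k + 2 : Nat) : Int)) := by
    apply List.map_congr_left
    intro k _
    push_cast; ring
  rw [hmap, foldA_eq, foldB_eq]

-- ===== VERDICT (by name: the statement is the Claim_ definition above) =====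
theorem calculate_prime_factorials_spec : Claim_equal_calculate_prime_factorials := by
  intro n _
  unfold Spec_calculate_prime_factorials
  exact both_eq n
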